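-- pv_equiv track=rewrite | github.com/pypi-data/pypi-mirror-86 | packages/appname-generator/appname_generator-0.1.1-py3-none-any.whl/appname_generator/generator/utils.py | max_siblings_consonants
-- ===== SOURCE A (Python) =====
-- CONSONANTS = "BCDFGHJKLMNPQRSTVWXZ"
--
-- def max_siblings_consonants(word, n):
--     counter = 0
--     for l in word:
--         if l in CONSONANTS:
--             counter += 1
--         else:
--             counter = 0
--         if counter > n:
--             return False
--     return True
-- ===== SOURCE B (Python) =====
-- CONSONANTS = "BCDFGHJKLMNPQRSTVWXZ"
--
-- def max_siblings_consonants(word, n):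
--     # groupby-style: walk the word group by group (maximal consonant runs /
--     # single non-consonants) and check each group's run length against n.
--     i, L = 0, len(word)
--     while i < L:
--         if word[i] in CONSONANTS:
--             j = i
--             while j < L and word[j] in CONSONANTS:
--                 j += 1
--             run, i = j - i, j
--         else:
--             run, i = 0, i + 1
--         if run > n:
--             return False
--     return True
-- ===== Notes on version B (the rewrite author's own statement) =====
-- stated objective: alternative
-- what changed: Replaces A's per-character running counter with a groupby-style scan that consumes each maximal consonant run at once and checks one run length per group (run = 0 for a non-consonant group).
import Mathlib
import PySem

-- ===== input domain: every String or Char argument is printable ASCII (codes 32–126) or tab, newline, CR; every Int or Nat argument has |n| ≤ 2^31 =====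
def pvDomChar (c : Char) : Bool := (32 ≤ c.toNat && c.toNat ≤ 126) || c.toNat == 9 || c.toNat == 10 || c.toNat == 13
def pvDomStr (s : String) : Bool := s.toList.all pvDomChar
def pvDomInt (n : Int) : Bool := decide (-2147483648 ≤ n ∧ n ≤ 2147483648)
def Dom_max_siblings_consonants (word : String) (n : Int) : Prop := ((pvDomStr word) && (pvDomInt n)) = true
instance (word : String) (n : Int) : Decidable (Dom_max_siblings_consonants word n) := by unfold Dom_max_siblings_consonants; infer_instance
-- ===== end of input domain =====

-- B replaces A's per-character running counter with a groupby-style scan over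
-- maximal consonant runs, checking one run length per group (alternative decomposition).

def CONSONANTS : List Char := "BCDFGHJKLMNPQRSTVWXZ".toList

-- `l in CONSONANTS` for a single character l (substring test = membership for one char)
def isCons (c : Char) : Bool := PySem.Chars.isIn [c] CONSONANTS

-- ===== PORT A =====
-- the for-loop of A: state = counter, early return False
def goA (n : Int) : List Char → Int → Bool
  | [], _ => true
  | l :: rest, counter =>
    let counter := if isCons l then counter + 1 else 0
    if counter > n then false else goA n rest counter

def max_siblings_consonants (word : String) (n : Int) : Bool :=
  goA n word.toList 0

-- ===== PORT B =====
-- inner while loop of B: length of the leading consonant run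
def runLen : List Char → Nat
  | [] => 0
  | c :: rest => if isCons c then runLen rest + 1 else 0

-- outer while loop of B: one step per group (maximal consonant run or single non-consonant)
def goB (n : Int) : List Char → Bool
  | [] => true
  | c :: rest =>
    if isCons c then
      if ((runLen rest + 1 : Nat) : Int) > n then false
      else goB n (rest.drop (runLen rest))
    else
      if (0 : Int) > n then false else goB n rest
termination_by xs => xs.length
decreasing_by all_goals simp

def max_siblings_consonants_alt (word : String) (n : Int) : Bool :=
  goB n word.toList

-- ===== PRECONDITION & SPEC =====
def Spec_max_siblings_consonants (word : String) (n : Int) (out : Bool) : Prop := out = max_siblings_consonants_alt word n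
instance (word : String) (n : Int) (out : Bool) : Decidable (Spec_max_siblings_consonants word n out) := by unfold Spec_max_siblings_consonants; infer_instance

-- ===== CLAIM (what is proved, stated in full; the proofs are below) =====
def Claim_equal_max_siblings_consonants : Prop := ∀ (word : String) (n : Int), Dom_max_siblings_consonants word n → Spec_max_siblings_consonants word n (max_siblings_consonants word n)

-- ===== LEMMAS AND PROOFS =====

-- for n < 0 both loops return False as soon as the word is non-empty
lemma goA_neg (n : Int) (hn : n < 0) (x : Char) (xs : List Char) (c : Int) (h0 : 0 ≤ c) :
    goA n (x :: xs) c = false := by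
  by_cases h : isCons x = true
  · simp only [goA, h, if_true]
    rw [if_pos (by omega : c + 1 > n)]
  · simp only [goA]
    rw [if_neg h, if_pos (by omega : (0 : Int) > n)]

lemma goB_neg (n : Int) (hn : n < 0) (x : Char) (xs : List Char) :
    goB n (x :: xs) = false := by
  by_cases h : isCons x = true
  · rw [goB, if_pos h, if_pos (by push_cast; omega : ((runLen xs + 1 : Nat) : Int) > n)]
  · rw [goB, if_neg h, if_pos (by omega : (0 : Int) > n)]

-- unfolding goB one whole leading-consonant group at a time (for n ≥ 0)
lemma goB_group (n : Int) (hn : 0 ≤ n) (xs : List Char) :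
    goB n xs = if ((runLen xs : Nat) : Int) > n then false else goB n (xs.drop (runLen xs)) := by
  cases xs with
  | nil =>
    rw [if_neg (by simp [runLen]; omega : ¬ ((runLen ([] : List Char) : Nat) : Int) > n)]
    simp [runLen]
  | cons x rest =>
    by_cases h : isCons x = true
    · rw [goB, if_pos h]
      have hr : runLen (x :: rest) = runLen rest + 1 := by simp [runLen, h]
      rw [hr]
      rfl
    · have hr : runLen (x :: rest) = 0 := by simp [runLen, h]
      rw [hr, if_neg (by push_cast; omega : ¬ ((0 : Nat) : Int) > n), List.drop_zero]

-- A's counter scan equals B's group scan: invariant = the partial run already counted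
lemma goA_eq_goB (n : Int) (hn : 0 ≤ n) :
    ∀ (xs : List Char) (c : Int), 0 ≤ c → c ≤ n →
      goA n xs c = if c + ((runLen xs : Nat) : Int) > n then false else goB n (xs.drop (runLen xs)) := by
  intro xs
  induction xs with
  | nil =>
    intro c h0 hc
    rw [if_neg (by simp [runLen]; omega : ¬ c + ((runLen ([] : List Char) : Nat) : Int) > n)]
    simp [goA, goB, runLen]
  | cons x rest ih =>
    intro c h0 hc
    by_cases h : isCons x = true
    · have hr : runLen (x :: rest) = runLen rest + 1 := by simp [runLen, h]
      simp only [goA, h, if_true, hr]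
      by_cases hgt : c + 1 > n
      · rw [if_pos hgt, if_pos (by push_cast; omega : c + ((runLen rest + 1 : Nat) : Int) > n)]
      · rw [if_neg hgt, ih (c + 1) (by omega) (by omega)]
        have hcast : c + 1 + ((runLen rest : Nat) : Int) = c + ((runLen rest + 1 : Nat) : Int) := by
          push_cast; ring
        rw [hcast]
        rfl
    · have hr : runLen (x :: rest) = 0 := by simp [runLen, h]
      have hB : goB n (x :: rest) = goB n rest := by
        rw [goB, if_neg h, if_neg (by omega : ¬ (0 : Int) > n)]
      simp only [goA]
      rw [if_neg h, if_neg (by omega : ¬ (0 : Int) > n), ih 0 le_rfl hn, hr,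
        if_neg (by push_cast; omega : ¬ c + ((0 : Nat) : Int) > n), List.drop_zero,
        hB, goB_group n hn rest]
      rw [show (0 : Int) + ((runLen rest : Nat) : Int) = ((runLen rest : Nat) : Int) by ring]

theorem goA_goB (word : String) (n : Int) : goA n word.toList 0 = goB n word.toList := by
  by_cases hn : 0 ≤ n
  · rw [goA_eq_goB n hn word.toList 0 le_rfl hn, goB_group n hn word.toList]
    rw [show (0 : Int) + ((runLen word.toList : Nat) : Int) = ((runLen word.toList : Nat) : Int) by ring]
  · cases h : word.toList with
    | nil => simp [goA, goB]
    | cons x xs => rw [goA_neg n (by omega) x xs 0 le_rfl, goB_neg n (by omega) x xs]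

-- ===== VERDICT (by name: the statement is the Claim_ definition above) =====
theorem max_siblings_consonants_spec : Claim_equal_max_siblings_consonants := by
  intro word n _
  show max_siblings_consonants word n = max_siblings_consonants_alt word n
  unfold max_siblings_consonants max_siblings_consonants_alt
  exact goA_goB word n
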